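-- pv_equiv track=rewrite | github.com/KaidenAngle/TomKingTrading | TomKingTradingFramework/comprehensive_syntax_error_fixer.py | _fix_indentation_blocks
-- ===== SOURCE A (Python) =====
-- from typing import List, Dict, Tuple
--
-- def _fix_indentation_blocks(content: str) -> Tuple[str, int]:
--     """Fix indentation issues systematically"""
--     fixes = 0
--     lines = content.split('\n')
--
--     i = 0
--     while i < len(lines):
--         line = lines[i]
--         stripped = line.strip()
--
--         # Found a statement that should have an indented block
--         if stripped.endswith(':') and any(keyword in stripped for keyword in ['try:', 'except', 'if', 'else:', 'elif', 'for', 'while', 'def', 'class']):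
--             current_indent = len(line) - len(line.lstrip())
--             expected_indent = current_indent + 4
--
--             # Check next non-empty line
--             j = i + 1
--             while j < len(lines) and not lines[j].strip():
--                 j += 1
--
--             if j < len(lines):
--                 next_line = lines[j]
--                 next_stripped = next_line.strip()
--                 next_indent = len(next_line) - len(next_line.lstrip()) if next_stripped else 0
--
--                 # If next line is not properly indented or is a control statement
--                 if next_stripped and (next_indent <= current_indent or
--                                     next_stripped.startswith(('except', 'finally', 'else', 'elif'))):
--                                         # Insert pass statement
--                     lines.insert(j, ' ' * expected_indent + 'pass')
--                     fixes += 1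
--                     i = j + 1
--                     continue
--                 elif not next_stripped:
--                     # Empty line, insert pass
--                     lines[j] = ' ' * expected_indent + 'pass'
--                     fixes += 1
--
--             elif j >= len(lines) and stripped == 'try:':
--                 # Try block at end of file
--                 lines.append(' ' * expected_indent + 'pass')
--                 fixes += 1
--
--         i += 1
--
--     return '\n'.join(lines), fixes
-- ===== SOURCE B (Python) =====
-- def _fix_indentation_blocks(content: str):
--     """Single forward scan with a cursor: builds a NEW output list by append instead of mutating the line list in place."""
--     lines = content.split('\n')
--     n = len(lines)
--     out = []
--     fixes = 0
--     i = 0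
--     while i < n:
--         line = lines[i]
--         out.append(line)
--         stripped = line.strip()
--         if stripped.endswith(':') and any(keyword in stripped for keyword in ['try:', 'except', 'if', 'else:', 'elif', 'for', 'while', 'def', 'class']):
--             current_indent = len(line) - len(line.lstrip())
--             # emit the blank lines while scanning ahead for the next non-blank line
--             j = i + 1
--             while j < n and not lines[j].strip():
--                 out.append(lines[j])
--                 j += 1
--             if j < n:
--                 next_line = lines[j]
--                 next_stripped = next_line.strip()
--                 next_indent = len(next_line) - len(next_line.lstrip())
--                 if next_indent <= current_indent or next_stripped.startswith(('except', 'finally', 'else', 'elif')):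
--                     out.append(' ' * (current_indent + 4) + 'pass')
--                     fixes += 1
--             else:
--                 if stripped == 'try:':
--                     out.append(' ' * (current_indent + 4) + 'pass')
--                     fixes += 1
--             i = j
--         else:
--             i += 1
--     return '\n'.join(out), fixes
-- ===== Notes on version B (the rewrite author's own statement) =====
-- stated objective: simpler
-- what changed: Replaces A's mutate-in-place list with index re-aiming (insert/append into `lines`, then jumping `i` past the inserted line) by a single forward scan with a cursor that appends every line, the skipped blanks and the inserted `pass` lines to a fresh output list, dropping the dead empty-next-line branch.
import Mathlib
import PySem

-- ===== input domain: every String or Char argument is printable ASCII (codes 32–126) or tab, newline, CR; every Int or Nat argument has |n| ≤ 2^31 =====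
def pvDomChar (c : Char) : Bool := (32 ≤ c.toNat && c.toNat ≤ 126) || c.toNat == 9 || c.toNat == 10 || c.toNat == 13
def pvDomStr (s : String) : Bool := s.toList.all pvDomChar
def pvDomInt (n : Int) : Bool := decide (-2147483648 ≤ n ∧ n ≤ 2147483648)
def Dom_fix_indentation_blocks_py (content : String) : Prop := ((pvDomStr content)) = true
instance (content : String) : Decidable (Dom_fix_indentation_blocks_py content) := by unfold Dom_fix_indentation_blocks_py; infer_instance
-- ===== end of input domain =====

-- B replaces A's in-place list surgery (insert/append into `lines` and re-aimed index `i`) by a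
-- single forward cursor scan appending to a fresh output list; same return value, no mutation.

-- Helpers shared by both ports (the identical literal expressions of the two Python sources).

-- `stripped.endswith(':') and any(keyword in stripped for keyword in [...])`
def pvTrigger (stripped : String) : Bool :=
  PySem.Str.endswith stripped ":" &&
    (["try:", "except", "if", "else:", "elif", "for", "while", "def", "class"].any
      (fun kw => PySem.Str.isIn kw stripped))

-- `len(line) - len(line.lstrip())`
def pvIndent (line : String) : Int :=
  PySem.Str.len line - PySem.Str.len (PySem.Str.lstrip line)

-- `' ' * (current_indent + 4) + 'pass'`
def pvPass (currentIndent : Int) : String :=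
  String.ofList (PySem.List.pyRepeat [' '] (currentIndent + 4) ++ "pass".toList)

-- `next_stripped.startswith(('except', 'finally', 'else', 'elif'))`
def pvStartsCtl (ns : String) : Bool :=
  PySem.Str.startswith ns "except" || PySem.Str.startswith ns "finally" ||
    PySem.Str.startswith ns "else" || PySem.Str.startswith ns "elif"

-- ===== PORT A =====

-- A's inner scan: `j = i + 1; while j < len(lines) and not lines[j].strip(): j += 1`
def pvFindJ (lines : List String) (j : Nat) : Nat :=
  if h : j < lines.length then
    if PySem.Str.strip lines[j] = "" then pvFindJ lines (j + 1) else j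
  else j
termination_by lines.length - j

-- A's outer `while i < len(lines)` loop, state (lines, i, fixes); the fuel only makes the
-- recursion total — `2 * lines.length + 2` provably exceeds the number of iterations.
def pvALoop (fuel : Nat) (lines : List String) (i : Nat) (fixes : Int) : List String × Int :=
  match fuel with
  | 0 => (lines, fixes)
  | fuel + 1 =>
    if h : i < lines.length then
      let line := lines[i]
      let stripped := PySem.Str.strip line
      if pvTrigger stripped then
        let cur := pvIndent line
        let j := pvFindJ lines (i + 1)
        if hj : j < lines.length then
          let nl := lines[j]
          let ns := PySem.Str.strip nl
          let ni : Int := if ns ≠ "" then pvIndent nl else 0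
          if ns ≠ "" ∧ (ni ≤ cur ∨ pvStartsCtl ns = true) then
            -- lines.insert(j, pass); fixes += 1; i = j + 1; continue
            pvALoop fuel (PySem.List.insert lines (j : Int) (pvPass cur)) (j + 1) (fixes + 1)
          else if ns = "" then
            -- dead in Python (lines[j] is non-blank by construction); kept literally
            pvALoop fuel (lines.set j (pvPass cur)) (i + 1) (fixes + 1)
          else
            pvALoop fuel lines (i + 1) fixes
        else
          if stripped = "try:" then
            pvALoop fuel (lines ++ [pvPass cur]) (i + 1) (fixes + 1)
          else
            pvALoop fuel lines (i + 1) fixes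
      else pvALoop fuel lines (i + 1) fixes
    else (lines, fixes)

def fix_indentation_blocks_py (content : String) : String × Int :=
  -- content.split('\n'); the separator is non-empty, so split? is always `some`
  let lines := (PySem.Str.split? content "\n").getD []
  let r := pvALoop (2 * lines.length + 2) lines 0 0
  (PySem.Str.join "\n" r.1, r.2)

-- ===== PORT B =====

-- B's inner scan: emits the blank lines passed over, returns (blanks, remainder)
def pvScanBlanks (rest : List String) : List String × List String :=
  match rest with
  | [] => ([], [])
  | l :: r =>
    if PySem.Str.strip l = "" then
      let p := pvScanBlanks r
      (l :: p.1, p.2)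
  else ([], l :: r)

theorem pvScanBlanks_snd_length (rest : List String) : (pvScanBlanks rest).2.length ≤ rest.length := by
  induction rest with
  | nil => simp [pvScanBlanks]
  | cons l r ih =>
    simp only [pvScanBlanks]
    split
    · simpa using Nat.le_succ_of_le ih
    · simp

-- B's cursor loop: `out` is the output accumulated so far, `rest` the lines from the cursor on
def pvBLoop (rest : List String) (out : List String) (fixes : Int) : List String × Int :=
  match rest with
  | [] => (out, fixes)
  | line :: tail =>
    if pvTrigger (PySem.Str.strip line) then
      match hr : (pvScanBlanks tail).2 with
      | [] =>
        if PySem.Str.strip line = "try:" then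
          (out ++ [line] ++ (pvScanBlanks tail).1 ++ [pvPass (pvIndent line)], fixes + 1)
        else (out ++ [line] ++ (pvScanBlanks tail).1, fixes)
      | nl :: t =>
        if pvIndent nl ≤ pvIndent line ∨ pvStartsCtl (PySem.Str.strip nl) = true then
          pvBLoop (nl :: t) (out ++ [line] ++ (pvScanBlanks tail).1 ++ [pvPass (pvIndent line)]) (fixes + 1)
        else
          pvBLoop (nl :: t) (out ++ [line] ++ (pvScanBlanks tail).1) fixes
    else pvBLoop tail (out ++ [line]) fixes
termination_by rest.length
decreasing_by
  · have := pvScanBlanks_snd_length tail; rw [hr] at this; simpa using Nat.lt_succ_of_le this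
  · have := pvScanBlanks_snd_length tail; rw [hr] at this; simpa using Nat.lt_succ_of_le this
  · simp

def fix_indentation_blocks_py_alt (content : String) : String × Int :=
  let lines := (PySem.Str.split? content "\n").getD []
  let r := pvBLoop lines [] 0
  (PySem.Str.join "\n" r.1, r.2)



-- ===== PRECONDITION & SPEC =====
def Spec_fix_indentation_blocks_py (content : String) (out : String × Int) : Prop := out = fix_indentation_blocks_py_alt content
instance (content : String) (out : String × Int) : Decidable (Spec_fix_indentation_blocks_py content out) := by unfold Spec_fix_indentation_blocks_py; infer_instance

-- ===== CLAIM (what is proved, stated in full; the proofs are below) =====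
def Claim_equal_fix_indentation_blocks_py : Prop := ∀ (content : String), Dom_fix_indentation_blocks_py content → Spec_fix_indentation_blocks_py content (fix_indentation_blocks_py content)

-- ===== LEMMAS AND PROOFS =====

theorem pvScanBlanks_append (r : List String) :
    (pvScanBlanks r).1 ++ (pvScanBlanks r).2 = r := by
  induction r with
  | nil => simp [pvScanBlanks]
  | cons l t ih =>
    simp only [pvScanBlanks]
    split
    · simpa using ih
    · simp

theorem pvScanBlanks_blank (r : List String) :
    ∀ b ∈ (pvScanBlanks r).1, PySem.Str.strip b = "" := by
  induction r with
  | nil => simp [pvScanBlanks]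
  | cons l t ih =>
    simp only [pvScanBlanks]
    split
    · next hl =>
      intro b hb
      rcases List.mem_cons.mp hb with rfl | hb
      · exact hl
      · exact ih b hb
    · simp

theorem pvScanBlanks_head (r : List String) (nl : String) (t : List String)
    (h : (pvScanBlanks r).2 = nl :: t) : PySem.Str.strip nl ≠ "" := by
  induction r generalizing nl t with
  | nil => simp [pvScanBlanks] at h
  | cons l r ih =>
    simp only [pvScanBlanks] at h
    split at h
    · exact ih nl t h
    · next hl => rw [List.cons.injEq] at h; rw [← h.1]; exact hl

theorem pvFindJ_eq (r P : List String) :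
    pvFindJ (P ++ r) P.length = P.length + (pvScanBlanks r).1.length := by
  induction r generalizing P with
  | nil => simp [pvFindJ, pvScanBlanks]
  | cons l t ih =>
    rw [pvFindJ]
    rw [dif_pos (by simp)]
    have hget : (P ++ l :: t)[P.length]'(by simp) = l := by
      rw [List.getElem_append_right (Nat.le_refl _)]; simp
    rw [hget]
    by_cases hl : PySem.Str.strip l = ""
    · rw [if_pos hl]
      have := ih (P ++ [l])
      simp only [List.append_assoc, List.singleton_append, List.length_append,
        List.length_cons, List.length_nil] at this
      rw [this]
      simp [pvScanBlanks, hl]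
      omega
    · rw [if_neg hl]
      simp [pvScanBlanks, hl]

theorem pvTrigger_blank : pvTrigger "" = false := by decide

theorem pvDropWhile_spaces (k : Nat) :
    List.dropWhile PySem.Chars.isspace (List.replicate k ' ' ++ "pass".toList) = "pass".toList := by
  induction k with
  | zero => decide
  | succ k ih =>
    simpa [List.replicate_succ, List.dropWhile_cons,
      show PySem.Chars.isspace ' ' = true from rfl] using ih

theorem pvStrip_pass (cur : Int) : PySem.Str.strip (pvPass cur) = "pass" := by
  have h1 : (PySem.Str.strip (pvPass cur)).toList = "pass".toList := by
    rw [PySem.Str.toList_strip]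
    simp only [pvPass, PySem.List.pyRepeat_singleton, String.toList_ofList]
    rw [PySem.Chars.strip, PySem.Chars.lstrip, pvDropWhile_spaces]
    decide
  have := congrArg String.ofList h1
  simpa using this

theorem pvTrigger_pass (cur : Int) : pvTrigger (PySem.Str.strip (pvPass cur)) = false := by
  rw [pvStrip_pass]; decide

theorem pvBLoop_blanks (bs : List String) (hb : ∀ b ∈ bs, PySem.Str.strip b = "")
    (r out : List String) (f : Int) :
    pvBLoop (bs ++ r) out f = pvBLoop r (out ++ bs) f := by
  induction bs generalizing out with
  | nil => simp
  | cons b bs ih =>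
    have hb0 : PySem.Str.strip b = "" := hb b (by simp)
    rw [List.cons_append, pvBLoop, hb0, pvTrigger_blank]
    simp only [Bool.false_eq_true, if_false]
    rw [ih (fun x hx => hb x (by simp [hx])) (out ++ [b])]
    simp

theorem pvALoop_notrig (R : List String) (hR : ∀ l ∈ R, pvTrigger (PySem.Str.strip l) = false) :
    ∀ (fuel : Nat) (P : List String) (f : Int), R.length + 1 ≤ fuel →
    pvALoop fuel (P ++ R) P.length f = (P ++ R, f) := by
  induction R with
  | nil =>
    intro fuel P f hf
    match fuel, hf with
    | fuel + 1, _ => rw [pvALoop]; rw [dif_neg (by simp)]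
  | cons l t ih =>
    intro fuel P f hf
    match fuel, hf with
    | fuel + 1, hf =>
      rw [pvALoop]
      rw [dif_pos (by simp)]
      have hget : (P ++ l :: t)[P.length]'(by simp) = l := by
        rw [List.getElem_append_right (Nat.le_refl _)]; simp
      simp only [hget, hR l (by simp), Bool.false_eq_true, if_false]
      have := ih (fun x hx => hR x (by simp [hx])) fuel (P ++ [l]) f (by simp only [List.length_cons] at hf; omega)
      simp only [List.append_assoc, List.singleton_append, List.length_append,
        List.length_cons, List.length_nil] at this
      simpa using this


theorem pvGetMid {α : Type} (X : List α) (l : α) (t : List α) (i : Nat) (hi : i = X.length)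
    (h : i < (X ++ l :: t).length) : (X ++ l :: t)[i] = l := by
  subst hi
  rw [List.getElem_append_right (Nat.le_refl _)]
  simp

theorem pvBLoop_cons_notrig (line : String) (tail out : List String) (f : Int)
    (h : ¬ pvTrigger (PySem.Str.strip line) = true) :
    pvBLoop (line :: tail) out f = pvBLoop tail (out ++ [line]) f := by
  rw [pvBLoop, if_neg h]

theorem pvBLoop_cons_trig_nil (line : String) (tail out : List String) (f : Int)
    (htrig : pvTrigger (PySem.Str.strip line) = true)
    (h2 : (pvScanBlanks tail).2 = []) :
    pvBLoop (line :: tail) out f =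
      if PySem.Str.strip line = "try:" then
        (out ++ [line] ++ (pvScanBlanks tail).1 ++ [pvPass (pvIndent line)], f + 1)
      else (out ++ [line] ++ (pvScanBlanks tail).1, f) := by
  rw [pvBLoop, if_pos htrig]
  split
  · rfl
  · next nl' t' hr => rw [h2] at hr; cases hr

theorem pvBLoop_cons_trig_cons (line : String) (tail out : List String) (f : Int)
    (nl : String) (t : List String)
    (htrig : pvTrigger (PySem.Str.strip line) = true)
    (h2 : (pvScanBlanks tail).2 = nl :: t) :
    pvBLoop (line :: tail) out f =
      if pvIndent nl ≤ pvIndent line ∨ pvStartsCtl (PySem.Str.strip nl) = true then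
        pvBLoop (nl :: t) (out ++ [line] ++ (pvScanBlanks tail).1 ++ [pvPass (pvIndent line)]) (f + 1)
      else
        pvBLoop (nl :: t) (out ++ [line] ++ (pvScanBlanks tail).1) f := by
  rw [pvBLoop, if_pos htrig]
  split
  · next hr => rw [h2] at hr; cases hr
  · next nl' t' hr =>
    rw [h2] at hr
    obtain ⟨rfl, rfl⟩ := (List.cons.injEq ..).mp hr
    rfl

set_option maxHeartbeats 1000000 in
theorem pvMain (fuel : Nat) :
    ∀ (R P : List String) (f : Int), 2 * R.length + 1 ≤ fuel →
    pvALoop fuel (P ++ R) P.length f = pvBLoop R P f := by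
  induction fuel with
  | zero => intro R P f h; omega
  | succ fuel ih =>
    intro R P f hfuel
    match R with
    | [] => rw [pvALoop, dif_neg (by simp), pvBLoop]; simp
    | line :: rest =>
      rw [pvALoop, dif_pos (by simp)]
      have hget : (P ++ line :: rest)[P.length]'(by simp) = line := by
        rw [List.getElem_append_right (Nat.le_refl _)]; simp
      simp only [hget]
      by_cases htrig : pvTrigger (PySem.Str.strip line) = true
      case neg =>
        rw [if_neg htrig, pvBLoop_cons_notrig line rest P f htrig]
        have h2 := ih rest (P ++ [line]) f (by simp only [List.length_cons] at hfuel; omega)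
        simp only [List.append_assoc, List.singleton_append, List.length_append,
          List.length_cons, List.length_nil] at h2
        simpa using h2
      case pos =>
        rw [if_pos htrig]
        rcases hbs : pvScanBlanks rest with ⟨bs, r'⟩
        have hb1 : (pvScanBlanks rest).1 = bs := by rw [hbs]
        have hb2 : (pvScanBlanks rest).2 = r' := by rw [hbs]
        have hrest : bs ++ r' = rest := by
          have h := pvScanBlanks_append rest; rw [hb1, hb2] at h; exact h
        have hblank : ∀ b ∈ bs, PySem.Str.strip b = "" := by
          have h := pvScanBlanks_blank rest; rw [hb1] at h; exact h
        have hlenrest : rest.length = bs.length + r'.length := by rw [← hrest]; simp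
        have hJ : pvFindJ (P ++ line :: rest) (P.length + 1) = P.length + 1 + bs.length := by
          have h := pvFindJ_eq rest (P ++ [line])
          rw [hb1] at h
          simpa using h
        rw [hJ]
        cases r' with
        | nil =>
          rw [pvBLoop_cons_trig_nil line rest P f htrig hb2, hb1]
          rw [List.append_nil] at hrest
          subst hrest
          rw [dif_neg (by simp; omega)]
          by_cases htry : PySem.Str.strip line = "try:"
          · rw [if_pos htry, if_pos htry]
            have hnt : ∀ l ∈ bs ++ [pvPass (pvIndent line)], pvTrigger (PySem.Str.strip l) = false := by
              intro l hl
              rcases List.mem_append.mp hl with h | h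
              · rw [hblank l h]; exact pvTrigger_blank
              · simp only [List.mem_singleton] at h; subst h; exact pvTrigger_pass _
            have h := pvALoop_notrig (bs ++ [pvPass (pvIndent line)]) hnt fuel (P ++ [line]) (f + 1)
              (by simp only [List.length_append, List.length_cons, List.length_nil] at hfuel ⊢; omega)
            simp only [List.append_assoc, List.singleton_append, List.cons_append,
              List.length_append, List.length_cons, List.length_nil] at h ⊢
            simpa using h
          · rw [if_neg htry, if_neg htry]
            have h := pvALoop_notrig bs (fun l hl => by rw [hblank l hl]; exact pvTrigger_blank) fuel (P ++ [line]) f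
              (by simp only [List.length_cons] at hfuel; omega)
            simp only [List.append_assoc, List.singleton_append, List.cons_append,
              List.length_append, List.length_cons, List.length_nil] at h ⊢
            simpa using h
        | cons nl t =>
          have hns : PySem.Str.strip nl ≠ "" := pvScanBlanks_head rest nl t hb2
          rw [pvBLoop_cons_trig_cons line rest P f nl t htrig hb2, hb1]
          have hsplit : P ++ line :: rest = (P ++ line :: bs) ++ nl :: t := by
            rw [← hrest]; simp
          rw [dif_pos (by rw [hsplit]; simp only [List.length_append, List.length_cons]; omega)]
          have hget2 : ∀ hp : P.length + 1 + bs.length < (P ++ line :: rest).length,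
              (P ++ line :: rest)[P.length + 1 + bs.length]'hp = nl := by
            intro hp
            rw [List.getElem_of_eq hsplit]
            exact pvGetMid _ _ _ _ (by simp; omega) _
          simp only [hget2]
          rw [if_pos hns]
          by_cases hcond : pvIndent nl ≤ pvIndent line ∨ pvStartsCtl (PySem.Str.strip nl) = true
          · rw [if_pos (show _ ∧ _ from ⟨hns, hcond⟩), if_pos hcond]
            have hins : PySem.List.insert (P ++ line :: rest)
                ((P.length + 1 + bs.length : Nat) : Int) (pvPass (pvIndent line))
                = (P ++ line :: bs) ++ pvPass (pvIndent line) :: nl :: t := by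
              rw [hsplit, PySem.List.insert_natCast _ _ _ (by simp; omega)]
              have hx : P.length + 1 + bs.length = (P ++ line :: bs).length := by simp; omega
              rw [hx, List.take_left, List.drop_left]
            rw [hins]
            have hlist : (P ++ line :: bs) ++ pvPass (pvIndent line) :: nl :: t
                = (P ++ line :: bs ++ [pvPass (pvIndent line)]) ++ nl :: t := by simp
            rw [hlist]
            have hidx : P.length + 1 + bs.length + 1
                = (P ++ line :: bs ++ [pvPass (pvIndent line)]).length := by
              simp only [List.length_append, List.length_cons, List.length_nil]
              omega
            rw [hidx]
            rw [ih (nl :: t) (P ++ line :: bs ++ [pvPass (pvIndent line)]) (f + 1)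
              (by simp only [List.length_cons] at hfuel hlenrest ⊢; omega)]
            simp
          · rw [if_neg (fun h => hcond h.2), if_neg (fun h => hns h), if_neg hcond]
            have h := ih rest (P ++ [line]) f (by simp only [List.length_cons] at hfuel; omega)
            rw [← hrest] at h
            rw [pvBLoop_blanks bs hblank] at h
            rw [← hrest]
            simp only [List.append_assoc, List.singleton_append, List.cons_append,
              List.length_append, List.length_cons, List.length_nil] at h ⊢
            simpa using h

-- ===== VERDICT (by name: the statement is the Claim_ definition above) =====
theorem fix_indentation_blocks_py_spec : Claim_equal_fix_indentation_blocks_py := by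
  intro content _
  unfold Spec_fix_indentation_blocks_py fix_indentation_blocks_py fix_indentation_blocks_py_alt
  have h := pvMain (2 * ((PySem.Str.split? content "\n").getD []).length + 2)
    ((PySem.Str.split? content "\n").getD []) [] 0 (by omega)
  simp only [List.nil_append, List.length_nil] at h
  simp [h]
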